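-- pv_equiv track=rewrite | github.com/alhaamid/semicolon | Inputs/sol_q3.py | saveTheUniverse
-- ===== SOURCE A (Python) =====
-- def saveTheUniverse(engines, queries):
-- 	best = 0
-- 	for e in engines:
-- 		if e in queries:
-- 			best = max(best, queries.index(e))
-- 		else:
-- 			return 0
-- 	return 1 + saveTheUniverse(engines, queries[best:])
-- ===== SOURCE B (Python) =====
-- def saveTheUniverse(engines, queries):
--     need = set(engines)
--     remaining = set(need)
--     count = 0
--     for q in queries:
--         if q in remaining:
--             remaining.discard(q)
--             if not remaining:
--                 count += 1
--                 remaining = need - {q}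
--     return count
-- ===== Notes on version B (the rewrite author's own statement) =====
-- stated objective: alternative
-- what changed: B replaces A's recursive slice-and-rescan (each level re-scans the query list once per engine via 'in'/'index' and then recurses on a slice) by a single left-to-right pass over queries that maintains the set of engines not yet seen in the current level, counting a level each time the set empties and restarting it at that element; asymptotically O(m+k) vs A's worst-case O(k*m^2), though A's C-level scans win on typical random inputs.
import Mathlib
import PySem

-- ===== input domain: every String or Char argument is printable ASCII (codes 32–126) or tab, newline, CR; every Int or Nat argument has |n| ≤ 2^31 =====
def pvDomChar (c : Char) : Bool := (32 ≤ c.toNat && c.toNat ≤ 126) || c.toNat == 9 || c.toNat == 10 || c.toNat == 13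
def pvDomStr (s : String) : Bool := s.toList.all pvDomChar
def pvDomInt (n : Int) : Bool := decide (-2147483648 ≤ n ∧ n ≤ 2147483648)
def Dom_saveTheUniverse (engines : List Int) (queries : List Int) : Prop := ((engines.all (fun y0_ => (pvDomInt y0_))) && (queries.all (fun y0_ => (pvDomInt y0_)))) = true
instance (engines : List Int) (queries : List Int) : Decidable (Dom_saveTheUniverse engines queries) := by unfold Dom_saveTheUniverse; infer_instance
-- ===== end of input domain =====

-- B replaces A's recursive slice-and-rescan by one left-to-right pass over queries with a
-- set of not-yet-seen engines per level (objective: alternative algorithm).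

-- ===== PORT A =====
-- the 'for e in engines' loop of A: 'none' where Python hits 'return 0' (an engine not in
-- queries); 'queries.index(e)' is guarded by 'e in queries', so the 'getD 0' is unreachable
def pvBestLoop (queries : List Int) : List Int → Int → Option Int
  | [], best => some best
  | e :: rest, best =>
    if queries.contains e then
      pvBestLoop queries rest (max best (((PySem.List.index? queries e).getD 0 : Nat) : Int))
    else
      none

-- A's recursion; the fuel only makes it total (queries.length + 1 suffices on Pre_;
-- outside Pre_ the Python recurses forever and raises RecursionError)
def pvGoA (engines : List Int) : Nat → List Int → Int
  | 0, _ => 0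
  | fuel + 1, queries =>
    match pvBestLoop queries engines 0 with
    | none => 0
    | some best => 1 + pvGoA engines fuel (PySem.List.slice queries (some best) none)

def saveTheUniverse (engines : List Int) (queries : List Int) : Int :=
  pvGoA engines (queries.length + 1) queries

-- ===== PORT B =====
-- the 'for q in queries' loop of B: remaining = engines not yet seen in the current level
def pvScan (need : PySem.Set Int) : PySem.Set Int → Int → List Int → Int
  | _, count, [] => count
  | remaining, count, q :: rest =>
    if PySem.Set.contains remaining q then
      let r := PySem.Set.discard remaining q
      if r = [] then
        pvScan need (PySem.Set.diff need (PySem.Set.ofList [q])) (count + 1) rest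
      else
        pvScan need r count rest
    else
      pvScan need remaining count rest

def saveTheUniverse_alt (engines : List Int) (queries : List Int) : Int :=
  let need := PySem.Set.ofList engines
  pvScan need need 0 queries

-- ===== PRECONDITION & SPEC =====
-- Pre_ excludes exactly the inputs on which the Python A recurses forever and raises
-- RecursionError: an empty engines list, or all engines equal to one value that occurs in
-- queries (then the slice never shrinks).  A returns normally on every other input.
def Pre_saveTheUniverse (engines : List Int) (queries : List Int) : Prop :=
  engines ≠ [] ∧ (¬ (∀ e ∈ engines, e = engines.headI) ∨ engines.headI ∉ queries)

instance (engines : List Int) (queries : List Int) : Decidable (Pre_saveTheUniverse engines queries) := by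
  unfold Pre_saveTheUniverse; infer_instance

def pvWitness_saveTheUniverse : List Int × List Int := ([1, 2], [2, 1, 2])

def Spec_saveTheUniverse (engines : List Int) (queries : List Int) (out : Int) : Prop :=
  out = saveTheUniverse_alt engines queries

instance (engines : List Int) (queries : List Int) (out : Int) : Decidable (Spec_saveTheUniverse engines queries out) := by
  unfold Spec_saveTheUniverse; infer_instance

-- ===== CLAIM (what is proved, stated in full; the proofs are below) =====
def Claim_equal_saveTheUniverse : Prop := ∀ (engines : List Int) (queries : List Int), Dom_saveTheUniverse engines queries → Pre_saveTheUniverse engines queries → Spec_saveTheUniverse engines queries (saveTheUniverse engines queries)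

-- ===== LEMMAS AND PROOFS =====

-- the largest first-occurrence index in q of a value of r (0 if r is empty)
def pvSup (r q : List Int) : Nat :=
  r.foldl (fun m e => max m (List.idxOf e q)) 0

theorem pvFold_le (q r : List Int) (a : Nat) :
    a ≤ r.foldl (fun m e => max m (List.idxOf e q)) a ∧
      ∀ e ∈ r, List.idxOf e q ≤ r.foldl (fun m e => max m (List.idxOf e q)) a := by
  induction r generalizing a with
  | nil => simp
  | cons x t ih =>
    obtain ⟨h1, h2⟩ := ih (max a (List.idxOf x q))
    refine ⟨le_trans (le_max_left _ _) h1, ?_⟩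
    intro e he
    rcases List.mem_cons.1 he with rfl | he
    · exact le_trans (le_max_right _ _) h1
    · exact h2 e he

theorem pvFold_le_of (q r : List Int) (a m : Nat) (ha : a ≤ m)
    (h : ∀ e ∈ r, List.idxOf e q ≤ m) :
    r.foldl (fun m e => max m (List.idxOf e q)) a ≤ m := by
  induction r generalizing a with
  | nil => simpa
  | cons x t ih =>
    exact ih _ (max_le ha (h x (List.mem_cons_self))) (fun e he => h e (List.mem_cons_of_mem _ he))

theorem pvFold_attained (q r : List Int) (a : Nat) :
    r.foldl (fun m e => max m (List.idxOf e q)) a = a ∨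
      ∃ e ∈ r, r.foldl (fun m e => max m (List.idxOf e q)) a = List.idxOf e q := by
  induction r generalizing a with
  | nil => simp
  | cons x t ih =>
    simp only [List.foldl_cons]
    rcases ih (max a (List.idxOf x q)) with h | ⟨e, he, h⟩
    · rcases max_cases a (List.idxOf x q) with ⟨hm, _⟩ | ⟨hm, _⟩
      · left; rw [h, hm]
      · right; exact ⟨x, List.mem_cons_self, by rw [h, hm]⟩
    · right; exact ⟨e, List.mem_cons_of_mem _ he, h⟩

theorem pvLe_sup (q r : List Int) {e : Int} (he : e ∈ r) : List.idxOf e q ≤ pvSup r q :=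
  (pvFold_le q r 0).2 e he

theorem pvSup_le (q r : List Int) {m : Nat} (h : ∀ e ∈ r, List.idxOf e q ≤ m) :
    pvSup r q ≤ m :=
  pvFold_le_of q r 0 m (Nat.zero_le m) h

theorem pvSup_attained (q : List Int) {r : List Int} (hr : r ≠ []) :
    ∃ e ∈ r, List.idxOf e q = pvSup r q := by
  rcases pvFold_attained q r 0 with h | ⟨e, he, h⟩
  · obtain ⟨e, he⟩ := List.exists_mem_of_ne_nil r hr
    have h1 := pvLe_sup q r he
    refine ⟨e, he, ?_⟩
    unfold pvSup at *
    omega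
  · exact ⟨e, he, h.symm⟩

theorem pvSup_congr (q r₁ r₂ : List Int) (h : ∀ x, x ∈ r₁ ↔ x ∈ r₂) :
    pvSup r₁ q = pvSup r₂ q := by
  refine le_antisymm ?_ ?_
  · exact pvSup_le _ _ (fun e he => pvLe_sup _ _ ((h e).1 he))
  · exact pvSup_le _ _ (fun e he => pvLe_sup _ _ ((h e).2 he))

theorem pvSup_cons_not_mem (x : Int) (rest r : List Int) (hr : r ≠ [])
    (hx : ∀ e ∈ r, e ≠ x) :
    pvSup r (x :: rest) = pvSup r rest + 1 := by
  refine le_antisymm ?_ ?_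
  · refine pvSup_le _ _ (fun e he => ?_)
    rw [List.idxOf_cons_ne _ (hx e he).symm]
    exact Nat.succ_le_succ (pvLe_sup _ _ he)
  · obtain ⟨e, he, hidx⟩ := pvSup_attained rest hr
    have := pvLe_sup (x :: rest) r he
    rw [List.idxOf_cons_ne _ (hx e he).symm] at this
    omega

theorem pvSup_cons_mem (x : Int) (rest r : List Int) (hx : x ∈ r)
    (hrf : r.filter (fun y => !y == x) ≠ []) :
    pvSup r (x :: rest) = pvSup (r.filter (fun y => !y == x)) rest + 1 := by
  refine le_antisymm ?_ ?_
  · refine pvSup_le _ _ (fun e he => ?_)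
    by_cases hex : e = x
    · subst hex; rw [List.idxOf_cons_self]; omega
    · rw [List.idxOf_cons_ne _ (Ne.symm hex)]
      have hef : e ∈ r.filter (fun y => !y == x) := by
        simp [List.mem_filter, he, hex]
      exact Nat.succ_le_succ (pvLe_sup _ _ hef)
  · obtain ⟨e, he, hidx⟩ := pvSup_attained rest hrf
    have hmem : e ∈ r ∧ e ≠ x := by simpa [List.mem_filter] using he
    have := pvLe_sup (x :: rest) r hmem.1
    rw [List.idxOf_cons_ne _ hmem.2.symm] at this
    omega

theorem pvHeadI_mem (l : List Int) (h : l ≠ []) : l.headI ∈ l := by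
  cases l with
  | nil => exact absurd rfl h
  | cons a t => exact List.mem_cons_self

theorem pvDiff_single (s : List Int) (x : Int) :
    PySem.Set.diff s (PySem.Set.ofList [x]) = PySem.Set.discard s x := by
  show s.filter _ = s.filter _
  apply List.filter_congr
  intro a _
  show (!(PySem.Set.ofList [x]).contains a) = (!a == x)
  have h1 : PySem.Set.ofList [x] = [x] := rfl
  rw [h1]
  have hbd : (a == x) = decide (a = x) := by by_cases h : a = x <;> simp [h]
  simp [PySem.Set.contains_eq_listContains, hbd]

theorem pvScan_missing (need : PySem.Set Int) :
    ∀ (q r : List Int) (c : Int), (∃ e ∈ r, e ∉ q) → pvScan need r c q = c := by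
  intro q
  induction q with
  | nil => intro r c _; rfl
  | cons x rest ih =>
    intro r c ⟨e, her, heq⟩
    have hex : e ≠ x := fun h => heq (h ▸ List.mem_cons_self)
    have herest : e ∉ rest := fun h => heq (List.mem_cons_of_mem _ h)
    show pvScan need r c (x :: rest) = c
    rw [pvScan]
    by_cases hc : PySem.Set.contains r x
    · have hef : e ∈ PySem.Set.discard r x := by
        simp [PySem.Set.discard, List.mem_filter, her, hex]
      have hne : PySem.Set.discard r x ≠ [] := List.ne_nil_of_mem hef
      simp only [hc, if_true, hne]
      exact ih _ c ⟨e, hef, herest⟩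
    · simp only [hc]
      exact ih _ c ⟨e, her, herest⟩

theorem pvScan_complete (need : PySem.Set Int) :
    ∀ (q r : List Int) (c : Int), r ≠ [] → (∀ e ∈ r, e ∈ q) →
      ∃ e ∈ r, List.idxOf e q = pvSup r q ∧
        pvScan need r c q =
          pvScan need (PySem.Set.diff need (PySem.Set.ofList [e])) (c + 1)
            (q.drop (pvSup r q + 1)) := by
  intro q
  induction q with
  | nil =>
    intro r c hr hall
    obtain ⟨e, he⟩ := List.exists_mem_of_ne_nil r hr
    exact absurd (hall e he) (List.not_mem_nil)
  | cons x rest ih =>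
    intro r c hr hall
    by_cases hc : PySem.Set.contains r x
    · have hxr : x ∈ r := List.contains_iff_mem.1 hc
      by_cases hrf : PySem.Set.discard r x = []
      · -- remaining becomes empty: every element of r equals x, the level ends here
        have hallx : ∀ e ∈ r, e = x := by
          intro e he
          by_contra hex
          exact List.ne_nil_of_mem (show e ∈ PySem.Set.discard r x by
            simp [PySem.Set.discard, List.mem_filter, he, hex]) hrf
        have hsup : pvSup r (x :: rest) = 0 := by
          have := pvSup_le (x :: rest) r (m := 0) (fun e he => by
            rw [hallx e he, List.idxOf_cons_self])
          omega
        refine ⟨x, hxr, by rw [hsup, List.idxOf_cons_self], ?_⟩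
        rw [pvScan]
        simp only [hc, if_true, hrf, if_true, hsup]
        rfl
      · -- x removed from remaining, the scan continues in rest
        have hmemf : ∀ e ∈ PySem.Set.discard r x, e ∈ rest := by
          intro e he
          have h1 : e ∈ r ∧ e ≠ x := by
            simpa [PySem.Set.discard, List.mem_filter] using he
          rcases List.mem_cons.1 (hall e h1.1) with h | h
          · exact absurd h h1.2
          · exact h
        obtain ⟨e, hef, hidx, heq⟩ := ih (PySem.Set.discard r x) c hrf hmemf
        have h1 : e ∈ r ∧ e ≠ x := by
          simpa [PySem.Set.discard, List.mem_filter] using hef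
        have hsup : pvSup r (x :: rest) = pvSup (PySem.Set.discard r x) rest + 1 :=
          pvSup_cons_mem x rest r hxr hrf
        refine ⟨e, h1.1, ?_, ?_⟩
        · rw [List.idxOf_cons_ne _ h1.2.symm, hidx, hsup]
        · rw [pvScan]
          simp only [hc, if_true, hrf, if_false]
          rw [heq, hsup]
          rfl
    · -- x is not a remaining engine: skip it
      have hxr : x ∉ r := fun h => hc (List.contains_iff_mem.2 h)
      have hne : ∀ e ∈ r, e ≠ x := fun e he h => hxr (h ▸ he)
      have hmem : ∀ e ∈ r, e ∈ rest := by
        intro e he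
        rcases List.mem_cons.1 (hall e he) with h | h
        · exact absurd h (hne e he)
        · exact h
      obtain ⟨e, her, hidx, heq⟩ := ih r c hr hmem
      have hsup : pvSup r (x :: rest) = pvSup r rest + 1 :=
        pvSup_cons_not_mem x rest r hr hne
      refine ⟨e, her, ?_, ?_⟩
      · rw [List.idxOf_cons_ne _ (hne e her).symm, hidx, hsup]
      · rw [pvScan]
        simp only [hc]
        rw [heq, hsup]
        rfl

theorem pvIndex?_mem (l : List Int) (x : Int) (h : x ∈ l) :
    PySem.List.index? l x = some (List.idxOf x l) := by
  induction l with
  | nil => exact absurd h (List.not_mem_nil)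
  | cons a t ih =>
    by_cases hax : x = a
    · subst hax
      rw [PySem.List.index?_cons_self, List.idxOf_cons_self]
    · have hxt : x ∈ t := by
        rcases List.mem_cons.1 h with h' | h'
        · exact absurd h' hax
        · exact h'
      rw [PySem.List.index?_cons_of_ne t (fun h' => hax h'.symm), ih hxt,
        List.idxOf_cons_ne _ (Ne.symm hax)]
      rfl

theorem pvBestLoop_missing (q : List Int) :
    ∀ (es : List Int) (b : Int), (∃ e ∈ es, e ∉ q) → pvBestLoop q es b = none := by
  intro es
  induction es with
  | nil => intro b ⟨e, he, _⟩; exact absurd he (List.not_mem_nil)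
  | cons a t ih =>
    intro b ⟨e, he, heq⟩
    rw [pvBestLoop]
    by_cases hc : q.contains a
    · have hea : e ≠ a := fun h => heq (h ▸ List.contains_iff_mem.1 hc)
      have het : e ∈ t := by
        rcases List.mem_cons.1 he with h | h
        · exact absurd h hea
        · exact h
      simp only [hc, if_true]
      exact ih _ ⟨e, het, heq⟩
    · rw [Bool.not_eq_true] at hc
      rw [hc]
      rfl

theorem pvBestLoop_all (q : List Int) :
    ∀ (es : List Int), (∀ e ∈ es, e ∈ q) → ∀ (b : Nat),
      pvBestLoop q es ((b : Nat) : Int) =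
        some ((es.foldl (fun m e => max m (List.idxOf e q)) b : Nat) : Int) := by
  intro es
  induction es with
  | nil => intro _ b; rfl
  | cons a t ih =>
    intro hall b
    have haq : a ∈ q := hall a List.mem_cons_self
    rw [pvBestLoop]
    simp only [List.contains_iff_mem.2 haq, if_true]
    rw [pvIndex?_mem q a haq]
    have hcast : max ((b : Nat) : Int) (((List.idxOf a q : Nat) : Int)) =
        ((max b (List.idxOf a q) : Nat) : Int) := (Nat.cast_max _ _).symm
    show pvBestLoop q t (max ((b : Nat) : Int) ((Option.some (List.idxOf a q)).getD 0 : Nat)) = _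
    simp only [Option.getD_some]
    rw [hcast, ih (fun e he => hall e (List.mem_cons_of_mem _ he))]
    rfl

-- the main induction: with two distinct engine values, one completed level of A advances
-- B's scan by exactly one counted restart
theorem pvMain (engines : List Int) (e₁ e₂ : Int) (h1 : e₁ ∈ engines) (h2 : e₂ ∈ engines)
    (hne : e₁ ≠ e₂) :
    ∀ (fuel : Nat) (q : List Int) (c : Int), q.length < fuel →
      pvScan (PySem.Set.ofList engines) (PySem.Set.ofList engines) c q =
        c + pvGoA engines fuel q := by
  intro fuel
  induction fuel with
  | zero => intro q c h; omega
  | succ fuel ih =>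
    intro q c hlen
    by_cases hall : ∀ e ∈ engines, e ∈ q
    · -- every engine occurs in q: one level completes
      have hbest := pvBestLoop_all q engines hall 0
      set N := PySem.Set.ofList engines with hN
      set p : Nat := pvSup engines q with hp
      have hmemN : ∀ x, x ∈ N ↔ x ∈ engines := fun x => PySem.Set.mem_ofList engines x
      have hallN : ∀ e ∈ N, e ∈ q := fun e he => hall e ((hmemN e).1 he)
      have hNne : N ≠ [] := List.ne_nil_of_mem ((hmemN e₁).2 h1)
      have hsupN : pvSup N q = p := pvSup_congr q N engines hmemN
      -- p ≥ 1 because two distinct engines cannot share a first-occurrence index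
      have hp1 : 1 ≤ p := by
        by_contra h
        have hle1 := pvLe_sup q engines h1
        have hle2 := pvLe_sup q engines h2
        have hi1 : List.idxOf e₁ q = 0 := by omega
        have hi2 : List.idxOf e₂ q = 0 := by omega
        have hg1 : q[(0 : Nat)]? = some e₁ := by
          have hl1 : List.idxOf e₁ q < q.length := List.idxOf_lt_length_of_mem (hall e₁ h1)
          have hsome : q[List.idxOf e₁ q]? = some e₁ := by
            rw [List.getElem?_eq_getElem hl1, List.getElem_idxOf hl1]
          simpa [hi1] using hsome
        have hg2 : q[(0 : Nat)]? = some e₂ := by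
          have hl2 : List.idxOf e₂ q < q.length := List.idxOf_lt_length_of_mem (hall e₂ h2)
          have hsome : q[List.idxOf e₂ q]? = some e₂ := by
            rw [List.getElem?_eq_getElem hl2, List.getElem_idxOf hl2]
          simpa [hi2] using hsome
        rw [hg1] at hg2
        exact hne (Option.some.inj hg2)
      -- unfold A one level
      have h0 : ((0 : Nat) : Int) = (0 : Int) := rfl
      have hfold : List.foldl (fun m e => max m (List.idxOf e q)) 0 engines = p := rfl
      have hslice : PySem.List.slice q (some ((p : Nat) : Int)) none = q.drop p := by
        rw [PySem.List.slice_from q (by positivity)]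
        simp
      have hA : pvGoA engines (fuel + 1) q = 1 + pvGoA engines fuel (q.drop p) := by
        have hexp : pvGoA engines (fuel + 1) q =
            1 + pvGoA engines fuel (PySem.List.slice q (some ((p : Nat) : Int)) none) := by
          rw [pvGoA, ← h0, hbest, hfold]
        rw [hexp, hslice]
      -- unfold B one level via the scan lemma
      obtain ⟨e, heN, hidx, heq⟩ := pvScan_complete N q N c hNne hallN
      rw [hsupN] at hidx heq
      have hplen : p < q.length := hidx ▸ List.idxOf_lt_length_of_mem (hallN e heN)
      have hqe : q[p]? = some e := by
        have hl : List.idxOf e q < q.length := List.idxOf_lt_length_of_mem (hallN e heN)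
        have hsome : q[List.idxOf e q]? = some e := by
          rw [List.getElem?_eq_getElem hl, List.getElem_idxOf hl]
        simpa [hidx] using hsome
      have hdrop : q.drop p = e :: q.drop (p + 1) := by
        rw [List.drop_eq_getElem_cons hplen]
        rw [List.getElem?_eq_getElem hplen] at hqe
        rw [Option.some.inj hqe]
      -- one step of the scan on (drop p q) removes e and keeps the same count
      have hstep : pvScan N N (c + 1) (q.drop p) =
          pvScan N (PySem.Set.discard N e) (c + 1) (q.drop (p + 1)) := by
        rw [hdrop, pvScan]
        have hc : PySem.Set.contains N e = true := List.contains_iff_mem.2 heN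
        have hdne : PySem.Set.discard N e ≠ [] := by
          rcases eq_or_ne e e₁ with h | h
          · have hne2 : e₂ ≠ e := by rw [h]; exact fun hh => hne hh.symm
            exact List.ne_nil_of_mem (show e₂ ∈ PySem.Set.discard N e by
              simp [PySem.Set.discard, List.mem_filter, (hmemN e₂).2 h2, hne2])
          · have hne1 : e₁ ≠ e := fun hh => h hh.symm
            exact List.ne_nil_of_mem (show e₁ ∈ PySem.Set.discard N e by
              simp [PySem.Set.discard, List.mem_filter, (hmemN e₁).2 h1, hne1])
        simp only [hc, if_true, hdne, if_false]
      have hB : pvScan N N c q = pvScan N N (c + 1) (q.drop p) := by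
        rw [heq, pvDiff_single, hstep]
      have hdlen : (q.drop p).length < fuel := by
        rw [List.length_drop]
        omega
      rw [hA, hB, ih (q.drop p) (c + 1) hdlen]
      ring
    · -- some engine is missing from q: both sides stop here
      push Not at hall
      obtain ⟨e, he, heq⟩ := hall
      have hA : pvGoA engines (fuel + 1) q = 0 := by
        rw [pvGoA, pvBestLoop_missing q engines 0 ⟨e, he, heq⟩]
      have hB : pvScan (PySem.Set.ofList engines) (PySem.Set.ofList engines) c q = c :=
        pvScan_missing _ q _ c ⟨e, (PySem.Set.mem_ofList engines e).2 he, heq⟩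
      rw [hA, hB]
      ring

-- ===== VERDICT (by name: the statement is the Claim_ definition above) =====
theorem saveTheUniverse_spec : Claim_equal_saveTheUniverse := by
  unfold Claim_equal_saveTheUniverse
  intro engines queries _ hpre
  unfold Spec_saveTheUniverse saveTheUniverse saveTheUniverse_alt
  obtain ⟨hne, hdisj⟩ := hpre
  have hhead : engines.headI ∈ engines := pvHeadI_mem engines hne
  rcases hdisj with hnotall | hnotin
  · push Not at hnotall
    obtain ⟨e, he, hene⟩ := hnotall
    have := pvMain engines e engines.headI he hhead hene (queries.length + 1) queries 0
      (by omega)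
    simpa using this.symm
  · have hA : pvGoA engines (queries.length + 1) queries = 0 := by
      rw [pvGoA, pvBestLoop_missing queries engines 0 ⟨engines.headI, hhead, hnotin⟩]
    have hB : pvScan (PySem.Set.ofList engines) (PySem.Set.ofList engines) 0 queries = 0 :=
      pvScan_missing _ queries _ 0
        ⟨engines.headI, (PySem.Set.mem_ofList engines engines.headI).2 hhead, hnotin⟩
    rw [hA]
    exact hB.symm
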